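-- pv_equiv track=rewrite | github.com/pypi-data/pypi-mirror-403 | packages/aegis-stack/aegis_stack-0.5.4-py3-none-any.whl/aegis/templates/copier-aegis-project/{{ project_slug }}/app/components/frontend/dashboard/modals/database_modal.py | _convert_to_localhost
-- ===== SOURCE A (Python) =====
-- def _convert_to_localhost(url: str) -> str:
--     """Convert docker service names to localhost in URL."""
--     replacements = {
--         "@db:": "@localhost:",
--         "@postgres:": "@localhost:",
--         "@postgresql:": "@localhost:",
--         "@database:": "@localhost:",
--         "@redis:": "@localhost:",
--     }
--     result = url
--     for old, new in replacements.items():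
--         result = result.replace(old, new)
--     return result
-- ===== SOURCE B (Python) =====
-- def _convert_to_localhost(url: str) -> str:
--     """Convert docker service names to localhost in URL."""
--     out = []
--     i = 0
--     n = len(url)
--     while i < n:
--         if url.startswith("@db:", i):
--             out.append("@localhost:")
--             i += 4
--         elif url.startswith("@postgres:", i):
--             out.append("@localhost:")
--             i += 10
--         elif url.startswith("@postgresql:", i):
--             out.append("@localhost:")
--             i += 12
--         elif url.startswith("@database:", i):
--             out.append("@localhost:")
--             i += 10
--         elif url.startswith("@redis:", i):
--             out.append("@localhost:")
--             i += 7
--         else: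
--             out.append(url[i])
--             i += 1
--     return "".join(out)
-- ===== Notes on version B (the rewrite author's own statement) =====
-- stated objective: alternative
-- what changed: Replaces A's five sequential full-string str.replace passes (dict-and-loop) with a single left-to-right scan that checks the service tokens at each position and emits the substitution in one pass.
import Mathlib
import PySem

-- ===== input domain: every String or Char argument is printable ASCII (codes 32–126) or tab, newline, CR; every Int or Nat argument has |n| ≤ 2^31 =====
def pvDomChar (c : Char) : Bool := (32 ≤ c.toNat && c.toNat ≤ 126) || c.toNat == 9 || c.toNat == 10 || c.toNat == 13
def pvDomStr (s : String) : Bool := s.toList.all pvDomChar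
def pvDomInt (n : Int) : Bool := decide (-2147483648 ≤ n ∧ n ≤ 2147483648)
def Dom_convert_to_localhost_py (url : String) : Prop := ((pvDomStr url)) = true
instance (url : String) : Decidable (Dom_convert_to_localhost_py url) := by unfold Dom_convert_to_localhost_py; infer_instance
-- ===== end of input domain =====

set_option maxRecDepth 4000


-- B replaces A's five sequential full-string str.replace passes with one left-to-right scan
-- that substitutes the service tokens in a single pass (objective: alternative; return value proved equal).

-- ===== PORT A =====
-- literal port of A: a dict of replacements iterated with str.replace, sequentially
def convert_to_localhost_py (url : String) : String :=
  let replacements : PySem.Dict String String := PySem.Dict.mk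
    [("@db:", "@localhost:"), ("@postgres:", "@localhost:"), ("@postgresql:", "@localhost:"),
     ("@database:", "@localhost:"), ("@redis:", "@localhost:")]
  replacements.items.foldl (fun result oldnew => PySem.Str.replace result oldnew.1 oldnew.2) url

-- ===== PORT B =====
-- B-side helpers: the tokens checked by B's scan, as char lists
def pvTok1 : List Char := ['@','d','b',':']
def pvTok2 : List Char := ['@','p','o','s','t','g','r','e','s',':']
def pvTok3 : List Char := ['@','p','o','s','t','g','r','e','s','q','l',':']
def pvTok4 : List Char := ['@','d','a','t','a','b','a','s','e',':']
def pvTok5 : List Char := ['@','r','e','d','i','s',':']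
def pvNew : List Char := ['@','l','o','c','a','l','h','o','s','t',':']

-- Source B's while loop: advance an index over url, matching each token with startswith;
-- the index-suffix is represented by the remaining char list
def pvScan : List Char → List Char
  | [] => []
  | c :: t =>
    if pvTok1.isPrefixOf (c :: t) then pvNew ++ pvScan ((c :: t).drop 4)
    else if pvTok2.isPrefixOf (c :: t) then pvNew ++ pvScan ((c :: t).drop 10)
    else if pvTok3.isPrefixOf (c :: t) then pvNew ++ pvScan ((c :: t).drop 12)
    else if pvTok4.isPrefixOf (c :: t) then pvNew ++ pvScan ((c :: t).drop 10)
    else if pvTok5.isPrefixOf (c :: t) then pvNew ++ pvScan ((c :: t).drop 7)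
    else c :: pvScan t
termination_by l => l.length
decreasing_by all_goals (simp [List.length_drop]; try omega)

def convert_to_localhost_py_alt (url : String) : String :=
  String.ofList (pvScan url.toList)

-- ===== PRECONDITION & SPEC =====
def Spec_convert_to_localhost_py (url : String) (out : String) : Prop := out = convert_to_localhost_py_alt url
instance (url : String) (out : String) : Decidable (Spec_convert_to_localhost_py url out) := by unfold Spec_convert_to_localhost_py; infer_instance

-- ===== CLAIM (what is proved, stated in full; the proofs are below) =====
def Claim_equal_convert_to_localhost_py : Prop := ∀ (url : String), Dom_convert_to_localhost_py url → Spec_convert_to_localhost_py url (convert_to_localhost_py url)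

-- ===== LEMMAS AND PROOFS =====

-- structural-recursion form of PySem.Chars.replace (for nonempty old)
def pvRepl (old nw : List Char) : List Char → List Char
  | [] => []
  | c :: t =>
    if old ≠ [] ∧ old.isPrefixOf (c :: t) then nw ++ pvRepl old nw ((c :: t).drop old.length)
    else c :: pvRepl old nw t
termination_by l => l.length
decreasing_by
  · rename_i h
    have : 1 ≤ old.length := by
      cases old with
      | nil => exact absurd rfl h.1
      | cons a o => simp
    simp [List.length_drop]; omega
  · simp

lemma pvGoSpec (old nw : List Char) (ho : old ≠ []) :
    ∀ (fuel : Nat) (l acc : List Char), l.length ≤ fuel →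
      PySem.Chars.replace.go old nw fuel l acc = acc.reverse ++ pvRepl old nw l := by
  intro fuel
  induction fuel with
  | zero =>
    intro l acc hl
    have : l = [] := List.eq_nil_of_length_eq_zero (Nat.le_zero.mp hl)
    subst this
    simp [PySem.Chars.replace.go, pvRepl]
  | succ n ih =>
    intro l acc hl
    cases l with
    | nil => simp [PySem.Chars.replace.go, pvRepl]
    | cons c t =>
      by_cases hp : old.isPrefixOf (c :: t)
      · have hol : 1 ≤ old.length := by
          cases old with
          | nil => exact absurd rfl ho
          | cons a o => simp
        rw [show PySem.Chars.replace.go old nw (n+1) (c :: t) acc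
              = PySem.Chars.replace.go old nw n ((c :: t).drop old.length) (nw.reverse ++ acc) by
            simp [PySem.Chars.replace.go, hp]]
        rw [ih ((c :: t).drop old.length) (nw.reverse ++ acc)
            (by simp [List.length_drop] at *; omega)]
        rw [show pvRepl old nw (c :: t) = nw ++ pvRepl old nw ((c :: t).drop old.length) by
            rw [pvRepl]; simp [ho, hp]]
        simp
      · rw [show PySem.Chars.replace.go old nw (n+1) (c :: t) acc
              = PySem.Chars.replace.go old nw n t (c :: acc) by
            simp [PySem.Chars.replace.go, hp]]
        rw [ih t (c :: acc) (by simp at hl; omega)]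
        rw [show pvRepl old nw (c :: t) = c :: pvRepl old nw t by
            rw [pvRepl]; simp [hp]]
        simp

lemma pvReplaceEq (old nw s : List Char) (ho : old ≠ []) :
    PySem.Chars.replace s old nw = pvRepl old nw s := by
  unfold PySem.Chars.replace
  rw [if_neg (by simp [ho])]
  rw [pvGoSpec old nw ho s.length s [] (le_refl _)]
  simp

lemma pvNotpre {a u : List Char} (h1 : ¬ a <+: u) (h2 : ¬ u <+: a) (z : List Char) :
    ¬ a <+: u ++ z := by
  intro h
  rcases le_total a.length u.length with hl | hl
  · exact h1 (List.prefix_of_prefix_length_le h (List.prefix_append u z) hl)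
  · exact h2 (List.prefix_of_prefix_length_le (List.prefix_append u z) h hl)

-- a character other than '@' is always copied through by pvRepl (token heads are '@')
lemma pvSkipChar (v nw : List Char) (v' : List Char) (hv : v = '@' :: v')
    (c : Char) (hc : c ≠ '@') (y : List Char) :
    pvRepl v nw (c :: y) = c :: pvRepl v nw y := by
  rw [pvRepl]
  rw [if_neg]
  rintro ⟨-, hp⟩
  rw [List.isPrefixOf_iff_prefix] at hp
  subst hv
  rcases List.cons_prefix_cons.mp hp with ⟨h, -⟩
  exact hc h.symm

-- an '@'-free block is copied through unchanged
lemma pvSkipFree (v nw : List Char) (v' : List Char) (hv : v = '@' :: v') :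
    ∀ (u x : List Char), (∀ c ∈ u, c ≠ '@') → pvRepl v nw (u ++ x) = u ++ pvRepl v nw x := by
  intro u
  induction u with
  | nil => intro x _; simp
  | cons c u' ih =>
    intro x hu
    rw [List.cons_append, pvSkipChar v nw v' hv c (hu c (List.mem_cons_self)) _]
    rw [ih x (fun d hd => hu d (List.mem_cons_of_mem _ hd))]
    simp

-- a block '@'::w (w '@'-free) that v does not match at its head is copied through unchanged
lemma pvSkipBlock (v nw : List Char) (v' : List Char) (hv : v = '@' :: v')
    (w : List Char) (hw : ∀ c ∈ w, c ≠ '@') (x : List Char)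
    (hnp : ¬ v <+: ('@' :: w) ++ x) :
    pvRepl v nw (('@' :: w) ++ x) = ('@' :: w) ++ pvRepl v nw x := by
  rw [List.cons_append, pvRepl, if_neg]
  · rw [pvSkipFree v nw v' hv w x hw]
    simp
  · rintro ⟨-, hp⟩
    rw [List.isPrefixOf_iff_prefix] at hp
    exact hnp (by simpa using hp)

lemma pvMatch (nw x : List Char) (a : Char) (v'' : List Char) :
    pvRepl (a :: v'') nw ((a :: v'') ++ x) = nw ++ pvRepl (a :: v'') nw x := by
  rw [List.cons_append, pvRepl, if_pos]
  · have hd : List.drop (a :: v'').length (a :: (v'' ++ x)) = x := by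
      simpa using List.drop_left (l₁ := a :: v'') (l₂ := x)
    rw [hd]
  · exact ⟨List.cons_ne_nil a v'',
      by rw [List.isPrefixOf_iff_prefix]; simpa using List.prefix_append (a :: v'') x⟩

-- replacement only rewrites at '@' positions: membership of an '@'-free prefix is preserved
lemma pvPres (v nw : List Char) (v' nw' : List Char) (hv : v = '@' :: v') (hnw : nw = '@' :: nw') :
    ∀ (n : Nat) (l : List Char), l.length ≤ n → ∀ (p : List Char), (∀ c ∈ p, c ≠ '@') →
      (p <+: pvRepl v nw l ↔ p <+: l) := by
  intro n
  induction n with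
  | zero =>
    intro l hl p _
    have : l = [] := List.eq_nil_of_length_eq_zero (Nat.le_zero.mp hl)
    subst this
    simp [pvRepl]
  | succ n ih =>
    intro l hl p hp
    cases l with
    | nil => simp [pvRepl]
    | cons c t =>
      by_cases hm : v <+: (c :: t)
      · obtain ⟨x, hx⟩ := hm
        have hc : c = '@' := by
          rw [hv] at hx
          simp only [List.cons_append] at hx
          injection hx with h1 _
          exact h1.symm
        cases p with
        | nil => simp
        | cons a p' =>
          have ha : a ≠ '@' := hp a List.mem_cons_self
          have hchain : pvRepl v nw (c :: t) = nw ++ pvRepl v nw x := by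
            rw [← hx, hv]
            exact pvMatch nw x '@' v'
          constructor
          · intro h
            rw [hchain, hnw] at h
            rcases List.cons_prefix_cons.mp h with ⟨h1, -⟩
            exact (ha h1).elim
          · intro h
            rcases List.cons_prefix_cons.mp h with ⟨h1, -⟩
            exact (ha (h1.trans hc)).elim
      · have hchain : pvRepl v nw (c :: t) = c :: pvRepl v nw t := by
          rw [pvRepl, if_neg]
          rintro ⟨-, hq⟩
          exact hm (by rw [List.isPrefixOf_iff_prefix] at hq; exact hq)
        rw [hchain]
        cases p with
        | nil => simp
        | cons a p' =>
          rw [List.cons_prefix_cons, List.cons_prefix_cons]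
          constructor
          · rintro ⟨h1, h2⟩
            exact ⟨h1, (ih t (by simp at hl; omega) p'
              (fun d hd => hp d (List.mem_cons_of_mem _ hd))).mp h2⟩
          · rintro ⟨h1, h2⟩
            exact ⟨h1, (ih t (by simp at hl; omega) p'
              (fun d hd => hp d (List.mem_cons_of_mem _ hd))).mpr h2⟩

-- token tails (everything after the leading '@'; all '@'-free)
def pvT1 : List Char := ['d','b',':']
def pvT2 : List Char := ['p','o','s','t','g','r','e','s',':']
def pvT3 : List Char := ['p','o','s','t','g','r','e','s','q','l',':']
def pvT4 : List Char := ['d','a','t','a','b','a','s','e',':']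
def pvT5 : List Char := ['r','e','d','i','s',':']
def pvTW : List Char := ['l','o','c','a','l','h','o','s','t',':']

lemma pvMatchTok (v nw : List Char) (a : Char) (v'' : List Char) (hv : v = a :: v'') (x : List Char) :
    pvRepl v nw (v ++ x) = nw ++ pvRepl v nw x := by
  subst hv
  exact pvMatch nw x a v''

lemma pvSkipTok (v nw : List Char) (v' : List Char) (hv : v = '@' :: v')
    (u : List Char) (w : List Char) (hu : u = '@' :: w) (hw : ∀ c ∈ w, c ≠ '@')
    (hvu : ¬ v <+: u) (huv : ¬ u <+: v) (x : List Char) :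
    pvRepl v nw (u ++ x) = u ++ pvRepl v nw x := by
  subst hu
  exact pvSkipBlock v nw v' hv w hw x (pvNotpre hvu huv x)

lemma pvConsStep (v nw : List Char) (v' : List Char) (hv : v = '@' :: v') (y : List Char)
    (h : ¬ v' <+: y) : pvRepl v nw ('@' :: y) = '@' :: pvRepl v nw y := by
  rw [pvRepl, if_neg]
  rintro ⟨-, hq⟩
  rw [List.isPrefixOf_iff_prefix, hv, List.cons_prefix_cons] at hq
  exact h hq.2

lemma pvPresApp (v nw : List Char) (v' nw' : List Char) (hv : v = '@' :: v') (hnw : nw = '@' :: nw')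
    (p : List Char) (hp : ∀ c ∈ p, c ≠ '@') (t : List Char) :
    (p <+: pvRepl v nw t ↔ p <+: t) :=
  pvPres v nw v' nw' hv hnw t.length t le_rfl p hp

lemma pvPreFalse (v l : List Char) (h : ¬ v <+: l) : v.isPrefixOf l = false :=
  Bool.eq_false_iff.mpr (fun hb => h (List.isPrefixOf_iff_prefix.mp hb))

lemma pvNotPreHead (v : List Char) (v' : List Char) (hv : v = '@' :: v') (c : Char) (hc : c ≠ '@')
    (t : List Char) : v.isPrefixOf (c :: t) = false := by
  subst hv
  rw [Bool.eq_false_iff]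
  intro hb
  rcases List.cons_prefix_cons.mp (List.isPrefixOf_iff_prefix.mp hb) with ⟨h, -⟩
  exact hc h.symm

-- A's sequential chain of five replacements, on char lists
def pvChain (l : List Char) : List Char :=
  pvRepl pvTok5 pvNew (pvRepl pvTok4 pvNew (pvRepl pvTok3 pvNew
    (pvRepl pvTok2 pvNew (pvRepl pvTok1 pvNew l))))

lemma pvMain : ∀ (n : Nat) (l : List Char), l.length ≤ n → pvChain l = pvScan l := by
  intro n
  induction n with
  | zero =>
    intro l hl
    have : l = [] := List.eq_nil_of_length_eq_zero (Nat.le_zero.mp hl)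
    subst this
    simp [pvChain, pvRepl, pvScan]
  | succ n ih =>
    intro l hl
    cases l with
    | nil => simp [pvChain, pvRepl, pvScan]
    | cons c t =>
      by_cases hc : c = '@'
      · subst hc
        by_cases h1 : pvTok1 <+: ('@' :: t)
        · -- '@'-case, token 1 matches at this position
          obtain ⟨x, hx⟩ := h1
          have hxlen : x.length ≤ n := by
            have hlen := congrArg List.length hx
            simp [pvTok1] at hlen
            simp at hl
            omega
          have hch : pvChain ('@' :: t) = pvNew ++ pvChain x := by
            rw [← hx]
            unfold pvChain
            rw [pvMatchTok pvTok1 pvNew '@' pvT1 rfl]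
            rw [pvSkipTok pvTok2 pvNew pvT2 rfl pvNew pvTW rfl (by simp [pvTok1, pvTok2, pvTok3, pvTok4, pvTok5, pvNew, pvT1, pvT2, pvT3, pvT4, pvT5, pvTW, List.cons_prefix_cons]) (by simp [pvTok1, pvTok2, pvTok3, pvTok4, pvTok5, pvNew, pvT1, pvT2, pvT3, pvT4, pvT5, pvTW, List.cons_prefix_cons]) (by simp [pvTok1, pvTok2, pvTok3, pvTok4, pvTok5, pvNew, pvT1, pvT2, pvT3, pvT4, pvT5, pvTW, List.cons_prefix_cons])]
            rw [pvSkipTok pvTok3 pvNew pvT3 rfl pvNew pvTW rfl (by simp [pvTok1, pvTok2, pvTok3, pvTok4, pvTok5, pvNew, pvT1, pvT2, pvT3, pvT4, pvT5, pvTW, List.cons_prefix_cons]) (by simp [pvTok1, pvTok2, pvTok3, pvTok4, pvTok5, pvNew, pvT1, pvT2, pvT3, pvT4, pvT5, pvTW, List.cons_prefix_cons]) (by simp [pvTok1, pvTok2, pvTok3, pvTok4, pvTok5, pvNew, pvT1, pvT2, pvT3, pvT4, pvT5, pvTW, List.cons_prefix_cons])]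
            rw [pvSkipTok pvTok4 pvNew pvT4 rfl pvNew pvTW rfl (by simp [pvTok1, pvTok2, pvTok3, pvTok4, pvTok5, pvNew, pvT1, pvT2, pvT3, pvT4, pvT5, pvTW, List.cons_prefix_cons]) (by simp [pvTok1, pvTok2, pvTok3, pvTok4, pvTok5, pvNew, pvT1, pvT2, pvT3, pvT4, pvT5, pvTW, List.cons_prefix_cons]) (by simp [pvTok1, pvTok2, pvTok3, pvTok4, pvTok5, pvNew, pvT1, pvT2, pvT3, pvT4, pvT5, pvTW, List.cons_prefix_cons])]
            rw [pvSkipTok pvTok5 pvNew pvT5 rfl pvNew pvTW rfl (by simp [pvTok1, pvTok2, pvTok3, pvTok4, pvTok5, pvNew, pvT1, pvT2, pvT3, pvT4, pvT5, pvTW, List.cons_prefix_cons]) (by simp [pvTok1, pvTok2, pvTok3, pvTok4, pvTok5, pvNew, pvT1, pvT2, pvT3, pvT4, pvT5, pvTW, List.cons_prefix_cons]) (by simp [pvTok1, pvTok2, pvTok3, pvTok4, pvTok5, pvNew, pvT1, pvT2, pvT3, pvT4, pvT5, pvTW, List.cons_prefix_cons])]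
          have hsc : pvScan ('@' :: t) = pvNew ++ pvScan x := by
            rw [pvScan]
            have b1 : (pvTok1).isPrefixOf ('@' :: t) = true :=
              List.isPrefixOf_iff_prefix.mpr (hx ▸ List.prefix_append pvTok1 x)
            have hd : ('@' :: t).drop 4 = x := by
              rw [← hx]
              simpa [pvTok1] using List.drop_left (l₁ := pvTok1) (l₂ := x)
            simp [b1, hd]
          rw [hch, hsc]
          exact congrArg (pvNew ++ ·) (ih x hxlen)
        ·
          by_cases h2 : pvTok2 <+: ('@' :: t)
          · -- '@'-case, token 2 matches at this position
            obtain ⟨x, hx⟩ := h2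
            have hxlen : x.length ≤ n := by
              have hlen := congrArg List.length hx
              simp [pvTok2] at hlen
              simp at hl
              omega
            have hch : pvChain ('@' :: t) = pvNew ++ pvChain x := by
              rw [← hx]
              unfold pvChain
              rw [pvSkipTok pvTok1 pvNew pvT1 rfl pvTok2 pvT2 rfl (by simp [pvTok1, pvTok2, pvTok3, pvTok4, pvTok5, pvNew, pvT1, pvT2, pvT3, pvT4, pvT5, pvTW, List.cons_prefix_cons]) (by simp [pvTok1, pvTok2, pvTok3, pvTok4, pvTok5, pvNew, pvT1, pvT2, pvT3, pvT4, pvT5, pvTW, List.cons_prefix_cons]) (by simp [pvTok1, pvTok2, pvTok3, pvTok4, pvTok5, pvNew, pvT1, pvT2, pvT3, pvT4, pvT5, pvTW, List.cons_prefix_cons])]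
              rw [pvMatchTok pvTok2 pvNew '@' pvT2 rfl]
              rw [pvSkipTok pvTok3 pvNew pvT3 rfl pvNew pvTW rfl (by simp [pvTok1, pvTok2, pvTok3, pvTok4, pvTok5, pvNew, pvT1, pvT2, pvT3, pvT4, pvT5, pvTW, List.cons_prefix_cons]) (by simp [pvTok1, pvTok2, pvTok3, pvTok4, pvTok5, pvNew, pvT1, pvT2, pvT3, pvT4, pvT5, pvTW, List.cons_prefix_cons]) (by simp [pvTok1, pvTok2, pvTok3, pvTok4, pvTok5, pvNew, pvT1, pvT2, pvT3, pvT4, pvT5, pvTW, List.cons_prefix_cons])]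
              rw [pvSkipTok pvTok4 pvNew pvT4 rfl pvNew pvTW rfl (by simp [pvTok1, pvTok2, pvTok3, pvTok4, pvTok5, pvNew, pvT1, pvT2, pvT3, pvT4, pvT5, pvTW, List.cons_prefix_cons]) (by simp [pvTok1, pvTok2, pvTok3, pvTok4, pvTok5, pvNew, pvT1, pvT2, pvT3, pvT4, pvT5, pvTW, List.cons_prefix_cons]) (by simp [pvTok1, pvTok2, pvTok3, pvTok4, pvTok5, pvNew, pvT1, pvT2, pvT3, pvT4, pvT5, pvTW, List.cons_prefix_cons])]
              rw [pvSkipTok pvTok5 pvNew pvT5 rfl pvNew pvTW rfl (by simp [pvTok1, pvTok2, pvTok3, pvTok4, pvTok5, pvNew, pvT1, pvT2, pvT3, pvT4, pvT5, pvTW, List.cons_prefix_cons]) (by simp [pvTok1, pvTok2, pvTok3, pvTok4, pvTok5, pvNew, pvT1, pvT2, pvT3, pvT4, pvT5, pvTW, List.cons_prefix_cons]) (by simp [pvTok1, pvTok2, pvTok3, pvTok4, pvTok5, pvNew, pvT1, pvT2, pvT3, pvT4, pvT5, pvTW, List.cons_prefix_cons])]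
            have hsc : pvScan ('@' :: t) = pvNew ++ pvScan x := by
              rw [pvScan]
              have b1 : (pvTok1).isPrefixOf ('@' :: t) = false := pvPreFalse pvTok1 _ h1
              have b2 : (pvTok2).isPrefixOf ('@' :: t) = true :=
                List.isPrefixOf_iff_prefix.mpr (hx ▸ List.prefix_append pvTok2 x)
              have hd : ('@' :: t).drop 10 = x := by
                rw [← hx]
                simpa [pvTok2] using List.drop_left (l₁ := pvTok2) (l₂ := x)
              simp [b1, b2, hd]
            rw [hch, hsc]
            exact congrArg (pvNew ++ ·) (ih x hxlen)
          ·
            by_cases h3 : pvTok3 <+: ('@' :: t)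
            · -- '@'-case, token 3 matches at this position
              obtain ⟨x, hx⟩ := h3
              have hxlen : x.length ≤ n := by
                have hlen := congrArg List.length hx
                simp [pvTok3] at hlen
                simp at hl
                omega
              have hch : pvChain ('@' :: t) = pvNew ++ pvChain x := by
                rw [← hx]
                unfold pvChain
                rw [pvSkipTok pvTok1 pvNew pvT1 rfl pvTok3 pvT3 rfl (by simp [pvTok1, pvTok2, pvTok3, pvTok4, pvTok5, pvNew, pvT1, pvT2, pvT3, pvT4, pvT5, pvTW, List.cons_prefix_cons]) (by simp [pvTok1, pvTok2, pvTok3, pvTok4, pvTok5, pvNew, pvT1, pvT2, pvT3, pvT4, pvT5, pvTW, List.cons_prefix_cons]) (by simp [pvTok1, pvTok2, pvTok3, pvTok4, pvTok5, pvNew, pvT1, pvT2, pvT3, pvT4, pvT5, pvTW, List.cons_prefix_cons])]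
                rw [pvSkipTok pvTok2 pvNew pvT2 rfl pvTok3 pvT3 rfl (by simp [pvTok1, pvTok2, pvTok3, pvTok4, pvTok5, pvNew, pvT1, pvT2, pvT3, pvT4, pvT5, pvTW, List.cons_prefix_cons]) (by simp [pvTok1, pvTok2, pvTok3, pvTok4, pvTok5, pvNew, pvT1, pvT2, pvT3, pvT4, pvT5, pvTW, List.cons_prefix_cons]) (by simp [pvTok1, pvTok2, pvTok3, pvTok4, pvTok5, pvNew, pvT1, pvT2, pvT3, pvT4, pvT5, pvTW, List.cons_prefix_cons])]
                rw [pvMatchTok pvTok3 pvNew '@' pvT3 rfl]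
                rw [pvSkipTok pvTok4 pvNew pvT4 rfl pvNew pvTW rfl (by simp [pvTok1, pvTok2, pvTok3, pvTok4, pvTok5, pvNew, pvT1, pvT2, pvT3, pvT4, pvT5, pvTW, List.cons_prefix_cons]) (by simp [pvTok1, pvTok2, pvTok3, pvTok4, pvTok5, pvNew, pvT1, pvT2, pvT3, pvT4, pvT5, pvTW, List.cons_prefix_cons]) (by simp [pvTok1, pvTok2, pvTok3, pvTok4, pvTok5, pvNew, pvT1, pvT2, pvT3, pvT4, pvT5, pvTW, List.cons_prefix_cons])]
                rw [pvSkipTok pvTok5 pvNew pvT5 rfl pvNew pvTW rfl (by simp [pvTok1, pvTok2, pvTok3, pvTok4, pvTok5, pvNew, pvT1, pvT2, pvT3, pvT4, pvT5, pvTW, List.cons_prefix_cons]) (by simp [pvTok1, pvTok2, pvTok3, pvTok4, pvTok5, pvNew, pvT1, pvT2, pvT3, pvT4, pvT5, pvTW, List.cons_prefix_cons]) (by simp [pvTok1, pvTok2, pvTok3, pvTok4, pvTok5, pvNew, pvT1, pvT2, pvT3, pvT4, pvT5, pvTW, List.cons_prefix_cons])]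
              have hsc : pvScan ('@' :: t) = pvNew ++ pvScan x := by
                rw [pvScan]
                have b1 : (pvTok1).isPrefixOf ('@' :: t) = false := pvPreFalse pvTok1 _ h1
                have b2 : (pvTok2).isPrefixOf ('@' :: t) = false := pvPreFalse pvTok2 _ h2
                have b3 : (pvTok3).isPrefixOf ('@' :: t) = true :=
                  List.isPrefixOf_iff_prefix.mpr (hx ▸ List.prefix_append pvTok3 x)
                have hd : ('@' :: t).drop 12 = x := by
                  rw [← hx]
                  simpa [pvTok3] using List.drop_left (l₁ := pvTok3) (l₂ := x)
                simp [b1, b2, b3, hd]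
              rw [hch, hsc]
              exact congrArg (pvNew ++ ·) (ih x hxlen)
            ·
              by_cases h4 : pvTok4 <+: ('@' :: t)
              · -- '@'-case, token 4 matches at this position
                obtain ⟨x, hx⟩ := h4
                have hxlen : x.length ≤ n := by
                  have hlen := congrArg List.length hx
                  simp [pvTok4] at hlen
                  simp at hl
                  omega
                have hch : pvChain ('@' :: t) = pvNew ++ pvChain x := by
                  rw [← hx]
                  unfold pvChain
                  rw [pvSkipTok pvTok1 pvNew pvT1 rfl pvTok4 pvT4 rfl (by simp [pvTok1, pvTok2, pvTok3, pvTok4, pvTok5, pvNew, pvT1, pvT2, pvT3, pvT4, pvT5, pvTW, List.cons_prefix_cons]) (by simp [pvTok1, pvTok2, pvTok3, pvTok4, pvTok5, pvNew, pvT1, pvT2, pvT3, pvT4, pvT5, pvTW, List.cons_prefix_cons]) (by simp [pvTok1, pvTok2, pvTok3, pvTok4, pvTok5, pvNew, pvT1, pvT2, pvT3, pvT4, pvT5, pvTW, List.cons_prefix_cons])]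
                  rw [pvSkipTok pvTok2 pvNew pvT2 rfl pvTok4 pvT4 rfl (by simp [pvTok1, pvTok2, pvTok3, pvTok4, pvTok5, pvNew, pvT1, pvT2, pvT3, pvT4, pvT5, pvTW, List.cons_prefix_cons]) (by simp [pvTok1, pvTok2, pvTok3, pvTok4, pvTok5, pvNew, pvT1, pvT2, pvT3, pvT4, pvT5, pvTW, List.cons_prefix_cons]) (by simp [pvTok1, pvTok2, pvTok3, pvTok4, pvTok5, pvNew, pvT1, pvT2, pvT3, pvT4, pvT5, pvTW, List.cons_prefix_cons])]
                  rw [pvSkipTok pvTok3 pvNew pvT3 rfl pvTok4 pvT4 rfl (by simp [pvTok1, pvTok2, pvTok3, pvTok4, pvTok5, pvNew, pvT1, pvT2, pvT3, pvT4, pvT5, pvTW, List.cons_prefix_cons]) (by simp [pvTok1, pvTok2, pvTok3, pvTok4, pvTok5, pvNew, pvT1, pvT2, pvT3, pvT4, pvT5, pvTW, List.cons_prefix_cons]) (by simp [pvTok1, pvTok2, pvTok3, pvTok4, pvTok5, pvNew, pvT1, pvT2, pvT3, pvT4, pvT5, pvTW, List.cons_prefix_cons])]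
                  rw [pvMatchTok pvTok4 pvNew '@' pvT4 rfl]
                  rw [pvSkipTok pvTok5 pvNew pvT5 rfl pvNew pvTW rfl (by simp [pvTok1, pvTok2, pvTok3, pvTok4, pvTok5, pvNew, pvT1, pvT2, pvT3, pvT4, pvT5, pvTW, List.cons_prefix_cons]) (by simp [pvTok1, pvTok2, pvTok3, pvTok4, pvTok5, pvNew, pvT1, pvT2, pvT3, pvT4, pvT5, pvTW, List.cons_prefix_cons]) (by simp [pvTok1, pvTok2, pvTok3, pvTok4, pvTok5, pvNew, pvT1, pvT2, pvT3, pvT4, pvT5, pvTW, List.cons_prefix_cons])]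
                have hsc : pvScan ('@' :: t) = pvNew ++ pvScan x := by
                  rw [pvScan]
                  have b1 : (pvTok1).isPrefixOf ('@' :: t) = false := pvPreFalse pvTok1 _ h1
                  have b2 : (pvTok2).isPrefixOf ('@' :: t) = false := pvPreFalse pvTok2 _ h2
                  have b3 : (pvTok3).isPrefixOf ('@' :: t) = false := pvPreFalse pvTok3 _ h3
                  have b4 : (pvTok4).isPrefixOf ('@' :: t) = true :=
                    List.isPrefixOf_iff_prefix.mpr (hx ▸ List.prefix_append pvTok4 x)
                  have hd : ('@' :: t).drop 10 = x := by
                    rw [← hx]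
                    simpa [pvTok4] using List.drop_left (l₁ := pvTok4) (l₂ := x)
                  simp [b1, b2, b3, b4, hd]
                rw [hch, hsc]
                exact congrArg (pvNew ++ ·) (ih x hxlen)
              ·
                by_cases h5 : pvTok5 <+: ('@' :: t)
                · -- '@'-case, token 5 matches at this position
                  obtain ⟨x, hx⟩ := h5
                  have hxlen : x.length ≤ n := by
                    have hlen := congrArg List.length hx
                    simp [pvTok5] at hlen
                    simp at hl
                    omega
                  have hch : pvChain ('@' :: t) = pvNew ++ pvChain x := by
                    rw [← hx]
                    unfold pvChain
                    rw [pvSkipTok pvTok1 pvNew pvT1 rfl pvTok5 pvT5 rfl (by simp [pvTok1, pvTok2, pvTok3, pvTok4, pvTok5, pvNew, pvT1, pvT2, pvT3, pvT4, pvT5, pvTW, List.cons_prefix_cons]) (by simp [pvTok1, pvTok2, pvTok3, pvTok4, pvTok5, pvNew, pvT1, pvT2, pvT3, pvT4, pvT5, pvTW, List.cons_prefix_cons]) (by simp [pvTok1, pvTok2, pvTok3, pvTok4, pvTok5, pvNew, pvT1, pvT2, pvT3, pvT4, pvT5, pvTW, List.cons_prefix_cons])]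
                    rw [pvSkipTok pvTok2 pvNew pvT2 rfl pvTok5 pvT5 rfl (by simp [pvTok1, pvTok2, pvTok3, pvTok4, pvTok5, pvNew, pvT1, pvT2, pvT3, pvT4, pvT5, pvTW, List.cons_prefix_cons]) (by simp [pvTok1, pvTok2, pvTok3, pvTok4, pvTok5, pvNew, pvT1, pvT2, pvT3, pvT4, pvT5, pvTW, List.cons_prefix_cons]) (by simp [pvTok1, pvTok2, pvTok3, pvTok4, pvTok5, pvNew, pvT1, pvT2, pvT3, pvT4, pvT5, pvTW, List.cons_prefix_cons])]
                    rw [pvSkipTok pvTok3 pvNew pvT3 rfl pvTok5 pvT5 rfl (by simp [pvTok1, pvTok2, pvTok3, pvTok4, pvTok5, pvNew, pvT1, pvT2, pvT3, pvT4, pvT5, pvTW, List.cons_prefix_cons]) (by simp [pvTok1, pvTok2, pvTok3, pvTok4, pvTok5, pvNew, pvT1, pvT2, pvT3, pvT4, pvT5, pvTW, List.cons_prefix_cons]) (by simp [pvTok1, pvTok2, pvTok3, pvTok4, pvTok5, pvNew, pvT1, pvT2, pvT3, pvT4, pvT5, pvTW, List.cons_prefix_cons])]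
                    rw [pvSkipTok pvTok4 pvNew pvT4 rfl pvTok5 pvT5 rfl (by simp [pvTok1, pvTok2, pvTok3, pvTok4, pvTok5, pvNew, pvT1, pvT2, pvT3, pvT4, pvT5, pvTW, List.cons_prefix_cons]) (by simp [pvTok1, pvTok2, pvTok3, pvTok4, pvTok5, pvNew, pvT1, pvT2, pvT3, pvT4, pvT5, pvTW, List.cons_prefix_cons]) (by simp [pvTok1, pvTok2, pvTok3, pvTok4, pvTok5, pvNew, pvT1, pvT2, pvT3, pvT4, pvT5, pvTW, List.cons_prefix_cons])]
                    rw [pvMatchTok pvTok5 pvNew '@' pvT5 rfl]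
                  have hsc : pvScan ('@' :: t) = pvNew ++ pvScan x := by
                    rw [pvScan]
                    have b1 : (pvTok1).isPrefixOf ('@' :: t) = false := pvPreFalse pvTok1 _ h1
                    have b2 : (pvTok2).isPrefixOf ('@' :: t) = false := pvPreFalse pvTok2 _ h2
                    have b3 : (pvTok3).isPrefixOf ('@' :: t) = false := pvPreFalse pvTok3 _ h3
                    have b4 : (pvTok4).isPrefixOf ('@' :: t) = false := pvPreFalse pvTok4 _ h4
                    have b5 : (pvTok5).isPrefixOf ('@' :: t) = true :=
                      List.isPrefixOf_iff_prefix.mpr (hx ▸ List.prefix_append pvTok5 x)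
                    have hd : ('@' :: t).drop 7 = x := by
                      rw [← hx]
                      simpa [pvTok5] using List.drop_left (l₁ := pvTok5) (l₂ := x)
                    simp [b1, b2, b3, b4, b5, hd]
                  rw [hch, hsc]
                  exact congrArg (pvNew ++ ·) (ih x hxlen)
                · -- '@'-case, no token matches here
                  have g1 : ¬ pvT1 <+: t := fun h => h1 (by
                    rw [show pvTok1 = '@' :: pvT1 from rfl]
                    exact List.cons_prefix_cons.mpr ⟨rfl, h⟩)
                  have g2 : ¬ pvT2 <+: t := fun h => h2 (by
                    rw [show pvTok2 = '@' :: pvT2 from rfl]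
                    exact List.cons_prefix_cons.mpr ⟨rfl, h⟩)
                  have g3 : ¬ pvT3 <+: t := fun h => h3 (by
                    rw [show pvTok3 = '@' :: pvT3 from rfl]
                    exact List.cons_prefix_cons.mpr ⟨rfl, h⟩)
                  have g4 : ¬ pvT4 <+: t := fun h => h4 (by
                    rw [show pvTok4 = '@' :: pvT4 from rfl]
                    exact List.cons_prefix_cons.mpr ⟨rfl, h⟩)
                  have g5 : ¬ pvT5 <+: t := fun h => h5 (by
                    rw [show pvTok5 = '@' :: pvT5 from rfl]
                    exact List.cons_prefix_cons.mpr ⟨rfl, h⟩)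
                  have m1 : ¬ pvT1 <+: t := g1
                  have m2 : ¬ pvT2 <+: pvRepl pvTok1 pvNew t := fun h => g2 (
                    (pvPresApp pvTok1 pvNew pvT1 pvTW rfl rfl pvT2 (by simp [pvTok1, pvTok2, pvTok3, pvTok4, pvTok5, pvNew, pvT1, pvT2, pvT3, pvT4, pvT5, pvTW, List.cons_prefix_cons]) (t)).mp (h))
                  have m3 : ¬ pvT3 <+: pvRepl pvTok2 pvNew (pvRepl pvTok1 pvNew t) := fun h => g3 (
                    (pvPresApp pvTok1 pvNew pvT1 pvTW rfl rfl pvT3 (by simp [pvTok1, pvTok2, pvTok3, pvTok4, pvTok5, pvNew, pvT1, pvT2, pvT3, pvT4, pvT5, pvTW, List.cons_prefix_cons]) (t)).mp ((pvPresApp pvTok2 pvNew pvT2 pvTW rfl rfl pvT3 (by simp [pvTok1, pvTok2, pvTok3, pvTok4, pvTok5, pvNew, pvT1, pvT2, pvT3, pvT4, pvT5, pvTW, List.cons_prefix_cons]) (pvRepl pvTok1 pvNew t)).mp (h)))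
                  have m4 : ¬ pvT4 <+: pvRepl pvTok3 pvNew (pvRepl pvTok2 pvNew (pvRepl pvTok1 pvNew t)) := fun h => g4 (
                    (pvPresApp pvTok1 pvNew pvT1 pvTW rfl rfl pvT4 (by simp [pvTok1, pvTok2, pvTok3, pvTok4, pvTok5, pvNew, pvT1, pvT2, pvT3, pvT4, pvT5, pvTW, List.cons_prefix_cons]) (t)).mp ((pvPresApp pvTok2 pvNew pvT2 pvTW rfl rfl pvT4 (by simp [pvTok1, pvTok2, pvTok3, pvTok4, pvTok5, pvNew, pvT1, pvT2, pvT3, pvT4, pvT5, pvTW, List.cons_prefix_cons]) (pvRepl pvTok1 pvNew t)).mp ((pvPresApp pvTok3 pvNew pvT3 pvTW rfl rfl pvT4 (by simp [pvTok1, pvTok2, pvTok3, pvTok4, pvTok5, pvNew, pvT1, pvT2, pvT3, pvT4, pvT5, pvTW, List.cons_prefix_cons]) (pvRepl pvTok2 pvNew (pvRepl pvTok1 pvNew t))).mp (h))))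
                  have m5 : ¬ pvT5 <+: pvRepl pvTok4 pvNew (pvRepl pvTok3 pvNew (pvRepl pvTok2 pvNew (pvRepl pvTok1 pvNew t))) := fun h => g5 (
                    (pvPresApp pvTok1 pvNew pvT1 pvTW rfl rfl pvT5 (by simp [pvTok1, pvTok2, pvTok3, pvTok4, pvTok5, pvNew, pvT1, pvT2, pvT3, pvT4, pvT5, pvTW, List.cons_prefix_cons]) (t)).mp ((pvPresApp pvTok2 pvNew pvT2 pvTW rfl rfl pvT5 (by simp [pvTok1, pvTok2, pvTok3, pvTok4, pvTok5, pvNew, pvT1, pvT2, pvT3, pvT4, pvT5, pvTW, List.cons_prefix_cons]) (pvRepl pvTok1 pvNew t)).mp ((pvPresApp pvTok3 pvNew pvT3 pvTW rfl rfl pvT5 (by simp [pvTok1, pvTok2, pvTok3, pvTok4, pvTok5, pvNew, pvT1, pvT2, pvT3, pvT4, pvT5, pvTW, List.cons_prefix_cons]) (pvRepl pvTok2 pvNew (pvRepl pvTok1 pvNew t))).mp ((pvPresApp pvTok4 pvNew pvT4 pvTW rfl rfl pvT5 (by simp [pvTok1, pvTok2, pvTok3, pvTok4, pvTok5, pvNew,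 pvT1, pvT2, pvT3, pvT4, pvT5, pvTW, List.cons_prefix_cons]) (pvRepl pvTok3 pvNew (pvRepl pvTok2 pvNew (pvRepl pvTok1 pvNew t)))).mp (h)))))
                  have hch : pvChain ('@' :: t) = '@' :: pvChain t := by
                    unfold pvChain
                    rw [pvConsStep pvTok1 pvNew pvT1 rfl _ m1]
                    rw [pvConsStep pvTok2 pvNew pvT2 rfl _ m2]
                    rw [pvConsStep pvTok3 pvNew pvT3 rfl _ m3]
                    rw [pvConsStep pvTok4 pvNew pvT4 rfl _ m4]
                    rw [pvConsStep pvTok5 pvNew pvT5 rfl _ m5]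
                  have hsc : pvScan ('@' :: t) = '@' :: pvScan t := by
                    rw [pvScan]
                    have b1 : (pvTok1).isPrefixOf ('@' :: t) = false := pvPreFalse pvTok1 _ h1
                    have b2 : (pvTok2).isPrefixOf ('@' :: t) = false := pvPreFalse pvTok2 _ h2
                    have b3 : (pvTok3).isPrefixOf ('@' :: t) = false := pvPreFalse pvTok3 _ h3
                    have b4 : (pvTok4).isPrefixOf ('@' :: t) = false := pvPreFalse pvTok4 _ h4
                    have b5 : (pvTok5).isPrefixOf ('@' :: t) = false := pvPreFalse pvTok5 _ h5
                    simp [b1, b2, b3, b4, b5]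
                  rw [hch, hsc]
                  exact congrArg ('@' :: ·) (ih t (by simp at hl; omega))
      · -- head is not '@': every token starts with '@', so the character is copied
        have hch : pvChain (c :: t) = c :: pvChain t := by
          unfold pvChain
          rw [pvSkipChar pvTok1 pvNew pvT1 rfl c hc t]
          rw [pvSkipChar pvTok2 pvNew pvT2 rfl c hc _]
          rw [pvSkipChar pvTok3 pvNew pvT3 rfl c hc _]
          rw [pvSkipChar pvTok4 pvNew pvT4 rfl c hc _]
          rw [pvSkipChar pvTok5 pvNew pvT5 rfl c hc _]
        have hsc : pvScan (c :: t) = c :: pvScan t := by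
          rw [pvScan]
          have b1 : pvTok1.isPrefixOf (c :: t) = false := pvNotPreHead pvTok1 pvT1 rfl c hc t
          have b2 : pvTok2.isPrefixOf (c :: t) = false := pvNotPreHead pvTok2 pvT2 rfl c hc t
          have b3 : pvTok3.isPrefixOf (c :: t) = false := pvNotPreHead pvTok3 pvT3 rfl c hc t
          have b4 : pvTok4.isPrefixOf (c :: t) = false := pvNotPreHead pvTok4 pvT4 rfl c hc t
          have b5 : pvTok5.isPrefixOf (c :: t) = false := pvNotPreHead pvTok5 pvT5 rfl c hc t
          simp [b1, b2, b3, b4, b5]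
        rw [hch, hsc]
        exact congrArg (c :: ·) (ih t (by simp at hl; omega))

-- ===== VERDICT (by name: the statement is the Claim_ definition above) =====
lemma pvStrReplEq (s o n : String) (ho : o.toList ≠ []) :
    PySem.Str.replace s o n = String.ofList (pvRepl o.toList n.toList s.toList) := by
  unfold PySem.Str.replace
  rw [pvReplaceEq _ _ _ ho]

theorem convert_to_localhost_py_spec : Claim_equal_convert_to_localhost_py := by
  intro url _
  unfold Spec_convert_to_localhost_py convert_to_localhost_py convert_to_localhost_py_alt
  simp only [List.foldl]
  rw [pvStrReplEq url "@db:" "@localhost:" (by decide)]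
  rw [pvStrReplEq _ "@postgres:" _ (by decide)]
  rw [pvStrReplEq _ "@postgresql:" _ (by decide)]
  rw [pvStrReplEq _ "@database:" _ (by decide)]
  rw [pvStrReplEq _ "@redis:" _ (by decide)]
  simp only [String.toList_ofList]
  rw [show ("@db:" : String).toList = pvTok1 from by decide,
      show ("@postgres:" : String).toList = pvTok2 from by decide,
      show ("@postgresql:" : String).toList = pvTok3 from by decide,
      show ("@database:" : String).toList = pvTok4 from by decide,
      show ("@localhost:" : String).toList = pvNew from by decide,
      show ("@redis:" : String).toList = pvTok5 from by decide]
  exact congrArg String.ofList (pvMain url.toList.length url.toList le_rfl)
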